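-- pv_equiv track=rewrite | github.com/Abdulsametklc/LeetCode | 1837-sum-of-digits-in-base-k/1837-sum-of-digits-in-base-k.py | sumBase
-- ===== SOURCE A (Python) =====
-- def sumBase(n, k):
--     if n == 0:
--         return 0
--
--     result = ""
--
--     while n > 0:
--         result = str(n % k) + result
--         n //= k
--
--     return sum(int(i) for i in str(result))
-- ===== SOURCE B (Python) =====
-- def sumBase(n, k):
--     total = 0
--     while n > 0:
--         r = n % k
--         while r > 0:
--             total += r % 10
--             r //= 10
--         n //= k
--     return total
-- ===== Notes on version B (the rewrite author's own statement) =====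
-- stated objective: simpler
-- what changed: Replaces A's build-a-decimal-string-of-all-remainders-then-sum-its-characters two-pass structure with a single arithmetic pass that digit-sums each remainder with % and // (no strings at all).
-- outside the precondition, e.g. on sumBase(5, -1): A returns 0, B returns 0
import Mathlib
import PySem

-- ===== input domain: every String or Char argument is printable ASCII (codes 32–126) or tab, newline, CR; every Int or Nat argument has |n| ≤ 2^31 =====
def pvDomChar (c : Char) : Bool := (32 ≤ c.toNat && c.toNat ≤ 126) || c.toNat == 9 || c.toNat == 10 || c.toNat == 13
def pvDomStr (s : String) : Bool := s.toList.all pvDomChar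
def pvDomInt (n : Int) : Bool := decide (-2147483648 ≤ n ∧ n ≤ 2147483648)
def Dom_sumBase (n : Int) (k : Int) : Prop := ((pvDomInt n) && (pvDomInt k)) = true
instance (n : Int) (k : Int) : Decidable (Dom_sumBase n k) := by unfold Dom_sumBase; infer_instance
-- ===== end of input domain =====

-- B replaces A's build-a-decimal-string-of-all-remainders-then-sum-its-characters
-- two-pass structure with a single arithmetic pass (digit-summing each remainder
-- with % and //, no strings); objective: simpler.

-- ===== PORT A =====
-- A's while-loop; the `2 ≤ k` part of the guard only makes the recursion total
-- (for 0 < n and k ≤ 1 Python diverges or raises — outside Pre_sumBase).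
def sumBaseLoopA (n : Int) (k : Int) (result : List Char) : List Char :=
  if h : 0 < n ∧ 2 ≤ k then
    sumBaseLoopA (PySem.Int.floordiv n k) k (PySem.Int.toChars (PySem.Int.mod n k) ++ result)
  else result
termination_by n.toNat
decreasing_by
  have h0 : PySem.Int.floordiv n k < n :=
    (PySem.Int.floordiv_lt_iff_lt_mul (by omega)).2 (by nlinarith [h.1, h.2])
  omega

def sumBase (n : Int) (k : Int) : Int :=
  if n = 0 then 0
  else
    -- result is a Python str; ported as List Char.  `int(i)` for the single
    -- character i is PySem.Int.ofChars? [i]; under Pre_ every i is a digit, so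
    -- the ValueError default 0 is never used.
    (sumBaseLoopA n k []).foldl (fun acc c => acc + (PySem.Int.ofChars? [c]).getD 0) 0

-- ===== PORT B =====
-- inner `while r > 0: total += r % 10; r //= 10`
def sumBaseDigits (r : Int) (total : Int) : Int :=
  if h : 0 < r then
    sumBaseDigits (PySem.Int.floordiv r 10) (total + PySem.Int.mod r 10)
  else total
termination_by r.toNat
decreasing_by
  have h0 : PySem.Int.floordiv r 10 < r :=
    (PySem.Int.floordiv_lt_iff_lt_mul (by omega)).2 (by nlinarith [h])
  omega

-- outer `while n > 0`; the `2 ≤ k` part of the guard only makes the recursion total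
def sumBaseLoopB (n : Int) (k : Int) (total : Int) : Int :=
  if h : 0 < n ∧ 2 ≤ k then
    sumBaseLoopB (PySem.Int.floordiv n k) k (sumBaseDigits (PySem.Int.mod n k) total)
  else total
termination_by n.toNat
decreasing_by
  have h0 : PySem.Int.floordiv n k < n :=
    (PySem.Int.floordiv_lt_iff_lt_mul (by omega)).2 (by nlinarith [h.1, h.2])
  omega

def sumBase_alt (n : Int) (k : Int) : Int := sumBaseLoopB n k 0

-- ===== PRECONDITION & SPEC =====
-- For 0 < n, Python A raises ZeroDivisionError (k = 0) or, for most k < 0,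
-- ValueError (a '-' in the remainder string), and loops forever for k = 1; Pre_
-- excludes all of k ≤ 1 with 0 < n, which also drops the degenerate negative-k
-- inputs whose remainders are all 0 (e.g. (5, -1)), where A and B both return 0.
def Pre_sumBase (n : Int) (k : Int) : Prop := n ≤ 0 ∨ 2 ≤ k
instance (n : Int) (k : Int) : Decidable (Pre_sumBase n k) := by unfold Pre_sumBase; infer_instance
def pvWitness_sumBase : Int × Int := (34, 6)

def Spec_sumBase (n : Int) (k : Int) (out : Int) : Prop := out = sumBase_alt n k
instance (n : Int) (k : Int) (out : Int) : Decidable (Spec_sumBase n k out) := by unfold Spec_sumBase; infer_instance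

-- ===== CLAIM (what is proved, stated in full; the proofs are below) =====
def Claim_equal_sumBase : Prop := ∀ (n : Int) (k : Int), Dom_sumBase n k → Pre_sumBase n k → Spec_sumBase n k (sumBase n k)

-- ===== LEMMAS AND PROOFS =====

-- int(i) of a decimal digit character
def pvCharVal (c : Char) : Int := (PySem.Int.ofChars? [c]).getD 0

lemma pvCharVal_digitChar : ∀ d : Nat, d < 10 → pvCharVal (Nat.digitChar d) = (d : Int) := by decide

lemma pvCharSum_toDigitsCore (f : Nat) :
    ∀ (n : Nat) (l : List Char), n < f →
      ((Nat.toDigitsCore 10 f n l).map pvCharVal).sum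
        = ((Nat.digits 10 n).sum : Int) + (l.map pvCharVal).sum := by
  induction f with
  | zero => intro n l h; omega
  | succ f ih =>
    intro n l h
    rw [Nat.toDigitsCore]
    by_cases h0 : n / 10 = 0
    · have hn : n < 10 := by omega
      simp only [h0, if_true, List.map_cons, List.sum_cons]
      rw [pvCharVal_digitChar _ (Nat.mod_lt _ (by omega))]
      rcases Nat.eq_zero_or_pos n with hz | hpos
      · subst hz; simp
      · rw [Nat.digits_def' (by omega : 1 < 10) hpos, h0]
        simp [Nat.mod_eq_of_lt hn]
    · simp only [h0, if_false]
      have hpos : 0 < n := by omega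
      have hlt : n / 10 < f := by
        have := Nat.div_lt_self hpos (by omega : 1 < 10)
        omega
      rw [ih (n / 10) _ hlt, Nat.digits_def' (by omega : 1 < 10) hpos]
      simp only [List.sum_cons, List.map_cons]
      rw [pvCharVal_digitChar _ (Nat.mod_lt _ (by omega))]
      push_cast
      ring

-- A's str(m) for m ≥ 0, character-summed, is the decimal digit sum of m
lemma pvCharSum_toChars (m : Nat) :
    ((PySem.Int.toChars (m : Int)).map pvCharVal).sum = ((Nat.digits 10 m).sum : Int) := by
  have : PySem.Int.toChars (m : Int) = Nat.toDigits 10 m := by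
    simp [PySem.Int.toChars]
  rw [this, Nat.toDigits]
  rw [pvCharSum_toDigitsCore (m + 1) m [] (by omega)]
  simp

-- B's inner loop computes the decimal digit sum
lemma pvSumBaseDigits_natCast (m : Nat) :
    ∀ t : Int, sumBaseDigits (m : Int) t = t + ((Nat.digits 10 m).sum : Int) := by
  induction m using Nat.strong_induction_on with
  | _ m ih =>
    intro t
    rw [sumBaseDigits]
    rcases Nat.eq_zero_or_pos m with hz | hpos
    · subst hz; simp
    · have hg : (0:Int) < (m : Int) := by exact_mod_cast hpos
      rw [dif_pos hg]
      rw [show PySem.Int.floordiv (m : Int) 10 = ((m / 10 : Nat) : Int) from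
            by exact_mod_cast PySem.Int.floordiv_natCast m 10,
          show PySem.Int.mod (m : Int) 10 = ((m % 10 : Nat) : Int) from
            by exact_mod_cast PySem.Int.mod_natCast m 10]
      rw [ih (m / 10) (Nat.div_lt_self hpos (by omega))]
      rw [Nat.digits_def' (by omega : 1 < 10) hpos]
      simp only [List.sum_cons]
      push_cast
      ring

-- the two while-loops agree (the guards are literally the same condition)
lemma pvLoops_agree (n : Int) (k : Int) (res : List Char) :
    ((sumBaseLoopA n k res).map pvCharVal).sum = sumBaseLoopB n k ((res.map pvCharVal).sum) := by
  induction n, res using sumBaseLoopA.induct k with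
  | case1 n res h ih =>
    rw [sumBaseLoopA, sumBaseLoopB, dif_pos h, dif_pos h]
    rw [ih]
    have hm : 0 ≤ PySem.Int.mod n k := PySem.Int.mod_nonneg _ (by omega)
    have hcast : PySem.Int.mod n k = (((PySem.Int.mod n k).toNat : Nat) : Int) := by omega
    congr 1
    rw [List.map_append, List.sum_append, hcast, pvCharSum_toChars,
        pvSumBaseDigits_natCast]
    ring
  | case2 n res h =>
    rw [sumBaseLoopA, sumBaseLoopB, dif_neg h, dif_neg h]

lemma pvAlt_nonpos (n k : Int) (h : n ≤ 0) : sumBase_alt n k = 0 := by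
  unfold sumBase_alt
  rw [sumBaseLoopB, dif_neg (by omega)]

-- ===== VERDICT (by name: the statement is the Claim_ definition above) =====
theorem sumBase_spec : Claim_equal_sumBase := by
  intro n k _ hpre
  unfold Spec_sumBase sumBase
  by_cases hz : n = 0
  · simp [hz, pvAlt_nonpos 0 k le_rfl]
  · rw [if_neg hz]
    have := pvLoops_agree n k []
    simp only [List.map_nil, List.sum_nil] at this
    rw [PySem.List.foldl_add]
    · simpa [pvCharVal] using this
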